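-- pv_equiv track=rewrite | github.com/avigad/model-counting | cpog/prototype/cpog_checker.py | cleanClause
-- ===== SOURCE A (Python) =====
-- def cleanClause(literalList):
--     slist = sorted(literalList, key = lambda v: -abs(v))
--     if len(slist) <= 1:
--         return slist
--     nlist = [slist[0]]
--     for i in range(1, len(slist)):
--         if slist[i-1] == slist[i]:
--             continue
--         if slist[i-1] == -slist[i]:
--             return None
--         nlist.append(slist[i])
--     return tuple(nlist)
-- ===== SOURCE B (Python) =====
-- def cleanClause(literalList):
--     if len(literalList) <= 1:
--         return sorted(literalList, key=lambda v: -abs(v))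
--     seen = set()
--     for v in literalList:
--         if -v in seen and v not in seen:
--             return None
--         seen.add(v)
--     return tuple(sorted(seen, key=lambda v: -abs(v)))
-- ===== Notes on version B (the rewrite author's own statement) =====
-- stated objective: alternative
-- what changed: A sorts the whole clause first and then scans adjacent pairs of the sorted list to dedup and detect complementary literals; B makes a single hash-set pass over the original list that dedups and detects a complementary pair directly, sorting only the distinct literals at the end.
import Mathlib
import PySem

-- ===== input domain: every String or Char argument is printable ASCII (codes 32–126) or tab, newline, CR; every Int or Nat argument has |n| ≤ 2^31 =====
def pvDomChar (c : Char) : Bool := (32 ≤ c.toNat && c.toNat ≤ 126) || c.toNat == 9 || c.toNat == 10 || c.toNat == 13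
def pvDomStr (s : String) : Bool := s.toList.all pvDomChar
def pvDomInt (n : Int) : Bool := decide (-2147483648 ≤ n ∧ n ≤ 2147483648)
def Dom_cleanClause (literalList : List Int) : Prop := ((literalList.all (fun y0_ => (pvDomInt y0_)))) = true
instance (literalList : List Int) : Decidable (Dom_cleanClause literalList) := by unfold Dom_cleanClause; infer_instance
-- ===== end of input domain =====

-- B replaces A's sort-then-adjacent-pair scan by a single pass over the original list with a
-- `seen` set that both dedups and detects complementary literals; the sort is done once on the
-- deduplicated set (objective: alternative algorithm, same cost class).

-- ===== PORT A =====
-- the 'for i in range(1, len(slist))' loop: prev = slist[i-1], nlist the accumulator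
def cleanAloop (prev : Int) (nlist : List Int) : List Int → Option (List Int)
  | [] => some nlist
  | x :: rest =>
    if prev = x then cleanAloop x nlist rest
    else if prev = -x then none
    else cleanAloop x (nlist ++ [x]) rest

def cleanClause (literalList : List Int) : Option (List Int) :=
  let slist := PySem.List.sorted literalList (fun v => -|v|)
  if slist.length ≤ 1 then some slist
  else
    match slist with
    | [] => some slist
    | h :: t => cleanAloop h [h] t

-- ===== PORT B =====
def cleanBloop (seen : PySem.Set Int) : List Int → Option (PySem.Set Int)
  | [] => some seen
  | v :: rest =>
    if PySem.Set.contains seen (-v) && !PySem.Set.contains seen v then none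
    else cleanBloop (PySem.Set.add seen v) rest

def cleanClause_alt (literalList : List Int) : Option (List Int) :=
  if literalList.length ≤ 1 then some (PySem.List.sorted literalList (fun v => -|v|))
  else
    match cleanBloop PySem.Set.empty literalList with
    | none => none
    | some seen => some (PySem.List.sorted seen (fun v => -|v|))

-- ===== PRECONDITION & SPEC =====
def Spec_cleanClause (literalList : List Int) (out : Option (List Int)) : Prop := out = cleanClause_alt literalList
instance (literalList : List Int) (out : Option (List Int)) : Decidable (Spec_cleanClause literalList out) := by unfold Spec_cleanClause; infer_instance

-- ===== CLAIM (what is proved, stated in full; the proofs are below) =====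
def Claim_equal_cleanClause : Prop := ∀ (literalList : List Int), Dom_cleanClause literalList → Spec_cleanClause literalList (cleanClause literalList)

-- ===== LEMMAS AND PROOFS =====

-- a clause is tautological iff it contains a complementary pair of nonzero literals
def pvTaut (l : List Int) : Prop := ∃ x, x ≠ 0 ∧ x ∈ l ∧ -x ∈ l

-- factor the A-loop: the accumulator is only ever appended to
def pvG (prev : Int) : List Int → Option (List Int)
  | [] => some []
  | x :: rest =>
    if prev = x then pvG x rest
    else if prev = -x then none
    else Option.map (x :: ·) (pvG x rest)

theorem cleanAloop_eq_pvG (t : List Int) : ∀ (prev : Int) (acc : List Int),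
    cleanAloop prev acc t = Option.map (acc ++ ·) (pvG prev t) := by
  induction t with
  | nil => intro prev acc; simp [cleanAloop, pvG]
  | cons x rest ih =>
    intro prev acc
    simp only [cleanAloop, pvG]
    split_ifs with h1 h2
    · simp [ih]
    · rfl
    · rw [ih]
      cases pvG x rest <;> simp

-- equal sort keys -|a| = -|b| mean equal or complementary literals
theorem pvKey_eq (a b : Int) (h : -|a| = -|b|) : a = b ∨ a = -b := by
  have : |a| = |b| := by omega
  exact abs_eq_abs.mp this

-- A-loop on a key-sorted non-tautological list: the distinct elements, strictly key-sorted
theorem pvG_some (t : List Int) : ∀ (prev : Int),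
    List.Pairwise (fun a b => -|a| ≤ -|b|) (prev :: t) →
    ¬ pvTaut (prev :: t) →
    ∃ d, pvG prev t = some d ∧
      List.Pairwise (fun a b : Int => -|a| < -|b|) (prev :: d) ∧
      (∀ y, y ∈ prev :: d ↔ y ∈ prev :: t) := by
  induction t with
  | nil =>
    intro prev _ _
    exact ⟨[], rfl, List.pairwise_singleton _ _, fun y => Iff.rfl⟩
  | cons x rest ih =>
    intro prev hp ht
    obtain ⟨hhead, htail⟩ := List.pairwise_cons.mp hp
    by_cases h1 : prev = x
    · subst h1
      obtain ⟨d, hg, hpw, hmem⟩ := ih prev htail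
        (fun ⟨y, hy0, hy1, hy2⟩ => ht ⟨y, hy0, List.mem_cons_of_mem _ hy1, List.mem_cons_of_mem _ hy2⟩)
      refine ⟨d, ?_, hpw, ?_⟩
      · simp [pvG, hg]
      · intro y
        have hm := hmem y
        simp only [List.mem_cons] at hm ⊢
        tauto
    · by_cases h2 : prev = -x
      · exfalso
        have hx0 : x ≠ 0 := by intro h; apply h1; omega
        exact ht ⟨x, hx0, List.mem_cons_of_mem _ (List.mem_cons_self), by
          rw [← h2]; exact List.mem_cons_self⟩
      · obtain ⟨d, hg, hpw, hmem⟩ := ih x htail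
          (fun ⟨y, hy0, hy1, hy2⟩ => ht ⟨y, hy0, List.mem_cons_of_mem _ hy1, List.mem_cons_of_mem _ hy2⟩)
        have hlt : -|prev| < -|x| := by
          have hle : -|prev| ≤ -|x| := hhead x List.mem_cons_self
          rcases lt_or_eq_of_le hle with h | h
          · exact h
          · rcases pvKey_eq prev x h with h' | h' <;> [exact absurd h' h1; exact absurd h' h2]
        refine ⟨x :: d, ?_, ?_, ?_⟩
        · simp [pvG, h1, h2, hg]
        · refine List.pairwise_cons.mpr ⟨?_, hpw⟩
          intro y hy
          rcases List.mem_cons.mp hy with h | h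
          · subst h; exact hlt
          · exact lt_trans hlt ((List.pairwise_cons.mp hpw).1 y h)
        · intro y
          have hm := hmem y
          simp only [List.mem_cons] at hm ⊢
          tauto

-- A-loop on a key-sorted tautological list: returns None
theorem pvG_none (t : List Int) : ∀ (prev : Int),
    List.Pairwise (fun a b => -|a| ≤ -|b|) (prev :: t) →
    pvTaut (prev :: t) →
    pvG prev t = none := by
  induction t with
  | nil =>
    intro prev _ ⟨y, hy0, hy1, hy2⟩
    simp only [List.mem_singleton] at hy1 hy2
    omega
  | cons x rest ih =>
    intro prev hp ht
    obtain ⟨hhead, htail⟩ := List.pairwise_cons.mp hp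
    obtain ⟨hx, htail2⟩ := List.pairwise_cons.mp htail
    by_cases h1 : prev = x
    · subst h1
      have : pvTaut (prev :: rest) := by
        obtain ⟨y, hy0, hy1, hy2⟩ := ht
        refine ⟨y, hy0, ?_, ?_⟩ <;> simp_all [List.mem_cons]
      simp [pvG, ih prev htail this]
    · by_cases h2 : prev = -x
      · simp only [pvG]; rw [if_neg h1, if_pos h2]
      · -- move the tautology witness fully into x :: rest
        obtain ⟨y, hy0, hy1, hy2⟩ := ht
        have hkey : ∀ z, z ∈ rest → z ≠ x → -|prev| = -|z| → False := by
          intro z hz _ he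
          have h3 : -|prev| ≤ -|x| := hhead x List.mem_cons_self
          have h4 : -|x| ≤ -|z| := hx z hz
          have : -|prev| = -|x| := by omega
          rcases pvKey_eq prev x this with h' | h' <;> [exact h1 h'; exact h2 h']
        have hy1' : y ∈ x :: rest := by
          rcases List.mem_cons.mp hy1 with h | h
          · -- y = prev: show -y forces a key collision
            subst h
            rcases List.mem_cons.mp hy2 with h' | h'
            · omega
            · rcases List.mem_cons.mp h' with h'' | h''
              · exact (h2 (by omega)).elim
              · exact (hkey (-y) h'' (by intro hh; exact h2 (by omega)) (by simp [abs_neg])).elim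
          · exact h
        have hy2' : -y ∈ x :: rest := by
          rcases List.mem_cons.mp hy2 with h | h
          · -- -y = prev
            have hyp : y ≠ prev := by omega
            rcases List.mem_cons.mp hy1' with h'' | h''
            · exact (h2 (by omega)).elim
            · exact (hkey y h'' (by intro hh; exact h2 (by omega)) (by rw [← h]; simp [abs_neg])).elim
          · exact h
        have : pvTaut (x :: rest) := ⟨y, hy0, hy1', hy2'⟩
        simp [pvG, h1, h2, ih x htail this]

-- B-loop invariant: seen never holds a complementary pair of nonzero literals
def pvInv (seen : List Int) : Prop := ∀ x, x ∈ seen → x ≠ 0 → -x ∉ seen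

-- the condition under which the B-loop, started from state seen, returns None
def pvBad (seen rest : List Int) : Prop :=
  ∃ x, x ≠ 0 ∧ ((-x ∈ seen ∧ x ∈ rest) ∨ (x ∈ rest ∧ -x ∈ rest))

theorem cleanBloop_spec (rest : List Int) : ∀ (seen : PySem.Set Int), pvInv seen →
    (pvBad seen rest → cleanBloop seen rest = none) ∧
    (¬ pvBad seen rest → cleanBloop seen rest = some (rest.foldl PySem.Set.add seen)) := by
  induction rest with
  | nil =>
    intro seen _
    refine ⟨fun ⟨x, _, h⟩ => ?_, fun _ => rfl⟩
    simp only [List.not_mem_nil] at h; tauto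
  | cons v rest ih =>
    intro seen hinv
    by_cases htest : (-v) ∈ seen ∧ v ∉ seen
    · have hb : cleanBloop seen (v :: rest) = none := by
        simp [cleanBloop, htest.1, htest.2]
      have hv0 : v ≠ 0 := by
        intro h; subst h; exact htest.2 (by simpa using htest.1)
      have hbad : pvBad seen (v :: rest) :=
        ⟨v, hv0, Or.inl ⟨htest.1, List.mem_cons_self⟩⟩
      exact ⟨fun _ => hb, fun hnb => (hnb hbad).elim⟩
    · have hstep : cleanBloop seen (v :: rest) = cleanBloop (PySem.Set.add seen v) rest := by
        rcases Decidable.not_and_iff_not_or_not.mp htest with h | h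
        · simp [cleanBloop, h]
        · have hv : v ∈ seen := Decidable.not_not.mp h
          simp [cleanBloop, hv]
      have hinv' : pvInv (PySem.Set.add seen v) := by
        intro x hx hx0 hnx
        rw [PySem.Set.mem_add] at hx hnx
        rcases hx with hx | hx
        · rcases hnx with hnx | hnx
          · exact hinv x hx hx0 hnx
          · -- -x = v, x ∈ seen: then -v = x ∈ seen, so test true unless v ∈ seen; both give complementary pair in seen
            have : -v ∈ seen := by rw [show -v = x by omega]; exact hx
            rcases Decidable.not_and_iff_not_or_not.mp htest with h | h
            · exact h this
            · exact hinv v (Decidable.not_not.mp h) (by omega) this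
        · rcases hnx with hnx | hnx
          · -- x = v, -x ∈ seen: test should have fired (or v ∈ seen with complement)
            subst hx
            rcases Decidable.not_and_iff_not_or_not.mp htest with h | h
            · exact h hnx
            · exact hinv x (Decidable.not_not.mp h) hx0 hnx
          · omega
      have hbadiff : pvBad seen (v :: rest) ↔ pvBad (PySem.Set.add seen v) rest := by
        constructor
        · rintro ⟨x, hx0, hcase⟩
          rcases hcase with ⟨hxs, hxr⟩ | ⟨hx1, hx2⟩
          · rcases List.mem_cons.mp hxr with h | h
            · -- x = v with -v ∈ seen: test false forces v ∈ seen, contradicting pvInv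
              subst h
              rcases Decidable.not_and_iff_not_or_not.mp htest with h' | h'
              · exact (h' hxs).elim
              · exact (hinv x (Decidable.not_not.mp h') hx0 hxs).elim
            · exact ⟨x, hx0, Or.inl ⟨(PySem.Set.mem_add seen v (-x)).mpr (Or.inl hxs), h⟩⟩
          · rcases List.mem_cons.mp hx1 with h | h
            · -- x = v, -x ∈ v::rest; -x ≠ v since x ≠ 0
              subst h
              have hnx : -x ∈ rest := by
                rcases List.mem_cons.mp hx2 with h' | h'
                · omega
                · exact h'
              exact ⟨-x, by omega, Or.inl ⟨by
                rw [neg_neg]; exact (PySem.Set.mem_add seen x x).mpr (Or.inr rfl), hnx⟩⟩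
            · rcases List.mem_cons.mp hx2 with h' | h'
              · exact ⟨x, hx0, Or.inl ⟨by rw [h']; exact (PySem.Set.mem_add seen v v).mpr (Or.inr rfl), h⟩⟩
              · exact ⟨x, hx0, Or.inr ⟨h, h'⟩⟩
        · rintro ⟨x, hx0, hcase⟩
          rcases hcase with ⟨hxs, hxr⟩ | ⟨hx1, hx2⟩
          · rcases (PySem.Set.mem_add seen v (-x)).mp hxs with h | h
            · exact ⟨x, hx0, Or.inl ⟨h, List.mem_cons_of_mem _ hxr⟩⟩
            · exact ⟨x, hx0, Or.inr ⟨List.mem_cons_of_mem _ hxr, by rw [h]; exact List.mem_cons_self⟩⟩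
          · exact ⟨x, hx0, Or.inr ⟨List.mem_cons_of_mem _ hx1, List.mem_cons_of_mem _ hx2⟩⟩
      obtain ⟨ihn, ihs⟩ := ih (PySem.Set.add seen v) hinv'
      constructor
      · intro hbad; rw [hstep]; exact ihn (hbadiff.mp hbad)
      · intro hnb; rw [hstep, ihs (fun hb => hnb (hbadiff.mpr hb))]; rfl

-- the two ports agree on every input
theorem pvMain (l : List Int) : cleanClause l = cleanClause_alt l := by
  have hlensort : (PySem.List.sorted l (fun v => -|v|)).length = l.length :=
    (PySem.List.sorted_perm l _ _).length_eq
  by_cases hlen : l.length ≤ 1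
  · simp [cleanClause, cleanClause_alt, hlen, hlensort]
  · have hinv0 : pvInv PySem.Set.empty := by intro x hx; simp [PySem.Set.empty] at hx
    have hbad_iff : pvBad PySem.Set.empty l ↔ pvTaut l := by
      unfold pvBad pvTaut PySem.Set.empty
      simp
    cases hs : PySem.List.sorted l (fun v => -|v|) with
    | nil => rw [hs] at hlensort; simp at hlensort; omega
    | cons h t =>
      have hp : List.Pairwise (fun a b : Int => -|a| ≤ -|b|) (h :: t) := by
        rw [← hs]; exact PySem.List.sorted_pairwise l _
      have hperm : (h :: t).Perm l := by rw [← hs]; exact PySem.List.sorted_perm l _ _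
      have hcond : ¬ ((h :: t).length ≤ 1) := by
        rw [hs] at hlensort
        simp only [List.length_cons] at hlensort ⊢
        omega
      have hA : cleanClause l = Option.map (fun d => h :: d) (pvG h t) := by
        simp only [cleanClause, hs]
        rw [if_neg hcond]
        rw [cleanAloop_eq_pvG]
        rfl
      by_cases htaut : pvTaut l
      · have htaut' : pvTaut (h :: t) := by
          obtain ⟨y, hy0, hy1, hy2⟩ := htaut
          exact ⟨y, hy0, hperm.mem_iff.mpr hy1, hperm.mem_iff.mpr hy2⟩
        rw [hA, pvG_none t h hp htaut']
        have hnone := (cleanBloop_spec l PySem.Set.empty hinv0).1 (hbad_iff.mpr htaut)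
        simp only [PySem.Set.empty] at hnone
        simp [cleanClause_alt, hlen, PySem.Set.empty, hnone]
      · have htaut' : ¬ pvTaut (h :: t) := by
          intro ⟨y, hy0, hy1, hy2⟩
          exact htaut ⟨y, hy0, hperm.mem_iff.mp hy1, hperm.mem_iff.mp hy2⟩
        obtain ⟨d, hg, hpw, hmem⟩ := pvG_some t h hp htaut'
        have hB := (cleanBloop_spec l PySem.Set.empty hinv0).2 (fun hb => htaut (hbad_iff.mp hb))
        have hfold : l.foldl PySem.Set.add PySem.Set.empty = PySem.Set.ofList l :=
          (PySem.Set.ofList_eq_foldl l).symm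
        simp only [PySem.Set.empty] at hfold
        have hnodup : (h :: d).Nodup :=
          hpw.imp (fun {a b} hab heq => absurd (heq ▸ hab) (lt_irrefl _))
        have hmem2 : ∀ y, y ∈ h :: d ↔ y ∈ PySem.Set.ofList l := by
          intro y
          rw [hmem y, hperm.mem_iff, PySem.Set.mem_ofList]
        have hperm2 : (h :: d).Perm (PySem.Set.ofList l) :=
          (List.perm_ext_iff_of_nodup hnodup (PySem.Set.nodup_ofList l)).mpr hmem2
        have hsorted : PySem.List.sorted (PySem.Set.ofList l) (fun v => -|v|) = h :: d :=
          PySem.List.sorted_eq_of_perm_of_pairwise_lt _ _ _ hperm2 hpw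
        simp only [PySem.Set.empty] at hB
        rw [hA, hg]
        simp [cleanClause_alt, hlen, PySem.Set.empty, hB, hfold, hsorted]

-- ===== VERDICT (by name: the statement is the Claim_ definition above) =====
theorem cleanClause_spec : Claim_equal_cleanClause := by
  intro literalList _
  exact pvMain literalList
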